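-- pv_equiv track=rewrite | github.com/elliome/advent-of-code | 2025/02/puzzle.py | find_part_2_matches
-- ===== SOURCE A (Python) =====
-- def find_part_2_matches(input:int) -> int :
--     input_string = str(input)
--     length = len(str(input_string))
--     half_length = int(length / 2) + 1
--
--     for i in range(1, half_length):
--         first_part = input_string[:i]
--         matches = True
--         for j in range(i, length, i):
--             if input_string[j: j+i] != first_part:
--                 matches = False
--                 break
--
--         if matches:
--             return input
--
--     return 0
-- ===== SOURCE B (Python) =====
-- def find_part_2_matches(input: int) -> int:
--     s = str(input)
--     return input if s in (s + s)[1:-1] else 0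
-- ===== Notes on version B (the rewrite author's own statement) =====
-- stated objective: idiomatic
-- what changed: Replaced the nested prefix-by-prefix chunk scan with the standard doubled-string idiom: s is a repetition of a shorter block iff s occurs in (s+s)[1:-1].
import Mathlib
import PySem

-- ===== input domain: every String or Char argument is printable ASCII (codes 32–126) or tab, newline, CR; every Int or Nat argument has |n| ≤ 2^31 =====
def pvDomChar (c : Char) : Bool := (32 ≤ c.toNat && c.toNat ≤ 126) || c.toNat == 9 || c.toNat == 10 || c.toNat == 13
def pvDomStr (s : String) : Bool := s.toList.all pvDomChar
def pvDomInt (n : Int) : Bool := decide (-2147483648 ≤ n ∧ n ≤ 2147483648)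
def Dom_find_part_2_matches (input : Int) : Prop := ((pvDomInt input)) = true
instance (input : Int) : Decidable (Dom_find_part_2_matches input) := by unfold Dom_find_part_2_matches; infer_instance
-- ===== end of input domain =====

-- B replaces A's nested prefix-by-prefix chunk scan by the idiomatic doubled-string test
-- `s in (s+s)[1:-1]` (true exactly when s is a repetition of a shorter block); same return value.

-- ===== PORT A =====
-- inner loop `for j in range(i, length, i): if input_string[j:j+i] != first_part: matches = False; break`
def pvChunksMatch (s : List Char) (i length : Int) : Bool :=
  (PySem.List.pyRange i length i).all
    (fun j => PySem.List.slice s (some j) (some (j + i)) == PySem.List.slice s none (some i))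

-- outer loop `for i in range(1, half_length): … if matches: return input` / final `return 0`
def pvScan (input : Int) (s : List Char) (length : Int) : List Int → Int
  | [] => 0
  | i :: rest => if pvChunksMatch s i length then input else pvScan input s length rest

def find_part_2_matches (input : Int) : Int :=
  let input_string := PySem.Int.toChars input
  let length := PySem.Chars.len input_string
  let half_length := PySem.Int.truncdiv length 2 + 1
  pvScan input input_string length (PySem.List.pyRange 1 half_length 1)

-- ===== PORT B =====
def find_part_2_matches_alt (input : Int) : Int :=
  let s := PySem.Int.toChars input
  if PySem.Chars.isIn s (PySem.List.slice (s ++ s) (some 1) (some (-1))) then input else 0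

-- ===== PRECONDITION & SPEC =====
def Spec_find_part_2_matches (input : Int) (out : Int) : Prop := out = find_part_2_matches_alt input
instance (input : Int) (out : Int) : Decidable (Spec_find_part_2_matches input out) := by unfold Spec_find_part_2_matches; infer_instance

-- ===== CLAIM (what is proved, stated in full; the proofs are below) =====
def Claim_equal_find_part_2_matches : Prop := ∀ (input : Int), Dom_find_part_2_matches input → Spec_find_part_2_matches input (find_part_2_matches input)

-- ===== LEMMAS AND PROOFS =====

lemma pvScan_eq (input : Int) (s : List Char) (n : Int) (is : List Int) :
    pvScan input s n is = if is.any (fun i => pvChunksMatch s i n) then input else 0 := by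
  induction is with
  | nil => simp [pvScan]
  | cons i rest ih => by_cases h : pvChunksMatch s i n <;> simp [pvScan, h, ih]

def pvChunkAll (s : List Char) (d : Nat) : Prop :=
  ∀ m : Nat, d ∣ m → 0 < m → m < s.length → (s.drop m).take d = s.take d

def pvPeriod (s : List Char) (d : Nat) : Prop :=
  ∀ j < s.length, s.getD j 'a' = s.getD (j % d) 'a'

lemma pvChunksMatch_iff (s : List Char) (d : Nat) (hd : 1 ≤ d) :
    pvChunksMatch s (d : Int) (s.length : Int) = true ↔ pvChunkAll s d := by
  unfold pvChunksMatch
  rw [List.all_eq_true]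
  constructor
  · intro h m hdvd hm hmlen
    have hj : ((m:Int)) ∈ PySem.List.pyRange (d:Int) (s.length:Int) (d:Int) := by
      rw [PySem.List.mem_pyRange_iff_of_pos (by exact_mod_cast hd)]
      refine ⟨by exact_mod_cast Nat.le_of_dvd hm hdvd, by exact_mod_cast hmlen, ?_⟩
      have : (d:Int) ∣ (m:Int) := by exact_mod_cast hdvd
      exact dvd_sub this dvd_rfl
    have := h _ hj
    simpa [PySem.List.slice_natCast_add, PySem.List.slice_to_natCast, beq_iff_eq] using this
  · intro h j hj
    rw [PySem.List.mem_pyRange_iff_of_pos (by exact_mod_cast hd)] at hj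
    obtain ⟨h1, h2, h3⟩ := hj
    have hj0 : 0 ≤ j := le_trans (by exact_mod_cast Nat.zero_le d) h1
    set m := j.toNat with hm
    have hjm : j = (m : Int) := (Int.toNat_of_nonneg hj0).symm
    have hdm : d ∣ m := by
      have hdj : (d:Int) ∣ j := by
        have := dvd_add h3 (dvd_refl (d:Int)); simpa using this
      rw [hjm] at hdj; exact_mod_cast hdj
    have hmpos : 0 < m := by omega
    have hmlen : m < s.length := by omega
    have := h m hdm hmpos hmlen
    rw [hjm]
    simp [PySem.List.slice_natCast_add, PySem.List.slice_to_natCast, this]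

lemma pvChunkAll_iff (s : List Char) (d : Nat) (hd : 1 ≤ d) (h2 : 2 * d ≤ s.length) :
    pvChunkAll s d ↔ d ∣ s.length ∧ pvPeriod s d := by
  obtain ⟨n, hn⟩ : ∃ n, s.length = n := ⟨_, rfl⟩
  rw [hn] at h2 ⊢
  constructor
  · intro h
    have hdvd : d ∣ n := by
      by_contra hnd
      have hmod : 0 < n % d := Nat.pos_of_ne_zero (fun h0 => hnd (Nat.dvd_of_mod_eq_zero h0))
      have hdm := Nat.div_add_mod n d
      have hd2 : 2 ≤ n / d := Nat.le_div_iff_mul_le (by omega) |>.mpr (by omega)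
      have heq := h (d * (n / d)) ⟨n / d, rfl⟩ (by positivity) (by omega)
      have hlen : min d (s.length - d * (n / d)) = min d s.length := by
        simpa using congrArg List.length heq
      rw [hn] at hlen
      have h1 : n - d * (n / d) = n % d := by omega
      rw [h1, min_eq_right (le_of_lt (Nat.mod_lt _ (by omega))),
          min_eq_left (by omega : d ≤ n)] at hlen
      have := Nat.mod_lt n (show 0 < d by omega)
      omega
    refine ⟨hdvd, fun j hj => ?_⟩
    by_cases hjd : j < d
    · rw [Nat.mod_eq_of_lt hjd]
    · rw [not_lt] at hjd
      set m := d * (j / d) with hm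
      have hdmj := Nat.div_add_mod j d
      have hj1 : 1 ≤ j / d := Nat.le_div_iff_mul_le (by omega) |>.mpr (by omega)
      have heq := h m ⟨j / d, rfl⟩ (by positivity) (by omega)
      have hr : j % d < d := Nat.mod_lt _ (by omega)
      have h1 : s.getD j 'a' = ((s.drop m).take d).getD (j % d) 'a' := by
        rw [List.getD_eq_getElem _ _ (by omega), List.getD_eq_getElem _ _ (by simp; omega)]
        simp only [List.getElem_take, List.getElem_drop]
        congr 1; omega
      rw [h1, heq, List.getD_eq_getElem _ _ (by simp; omega),
          List.getD_eq_getElem _ _ (by omega)]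
      simp
  · intro ⟨hdvd, hper⟩ m hdm hm hml
    have hmd : m + d ≤ n := by
      obtain ⟨a, ha⟩ := hdvd; obtain ⟨b, hb⟩ := hdm
      have : b < a := by nlinarith
      nlinarith
    apply List.ext_getElem
    · simp; omega
    · intro i hi1 hi2
      have hid : i < d := by simp at hi1; omega
      obtain ⟨b, hb⟩ := hdm
      have h1 : (m + i) % d = i := by
        rw [hb, Nat.mul_add_mod, Nat.mod_eq_of_lt hid]
      have := hper (m + i) (by omega)
      rw [h1] at this
      have haux : ∀ (p : Nat) (hp : p < s.length), s.getD p 'a' = s[p]'hp := fun p hp =>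
        List.getD_eq_getElem _ _ hp
      simp only [List.getElem_take, List.getElem_drop]
      rw [← haux (m+i) (by omega), ← haux i (by omega), this]

lemma pvRot_iff (s : List Char) (k : Nat) (hk : k ≤ s.length) (hn : 0 < s.length) :
    s = s.drop k ++ s.take k ↔
      ∀ j < s.length, s.getD j 'a' = s.getD ((j + k) % s.length) 'a' := by
  have hlen : (s.drop k ++ s.take k).length = s.length := by simp; omega
  have haux : ∀ j (hj : j < s.length),
      (s.drop k ++ s.take k)[j]'(by omega) = s.getD ((j + k) % s.length) 'a' := by
    intro j hj
    have hmlt : (j + k) % s.length < s.length := Nat.mod_lt _ hn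
    rw [List.getD_eq_getElem _ _ hmlt]
    by_cases hcase : j < s.length - k
    · have hidx : (j + k) % s.length = k + j := by
        rw [Nat.mod_eq_of_lt (by omega)]; omega
      rw [List.getElem_append_left (by simp; omega), List.getElem_drop]
      simp only [hidx]
    · have h1 : (j + k) % s.length = j + k - s.length := by
        rw [Nat.mod_eq_sub_mod (by omega), Nat.mod_eq_of_lt (by omega)]
      have hidx : (j + k) % s.length = j - (s.length - k) := by omega
      rw [List.getElem_append_right (by simp; omega), List.getElem_take]
      simp only [List.length_drop, hidx]
  constructor
  · intro h j hj
    have h1 : s.getD j 'a' = (s.drop k ++ s.take k).getD j 'a' := by rw [← h]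
    rw [h1, List.getD_eq_getElem _ _ (by omega), haux j hj]
  · intro h
    apply List.ext_getElem (by omega)
    intro i h1 h2
    rw [haux i h1, ← List.getD_eq_getElem s 'a' h1]
    exact h i h1

def pvQ (s : List Char) : Prop :=
  ∃ d : Nat, 1 ≤ d ∧ 2 * d ≤ s.length ∧ d ∣ s.length ∧ pvPeriod s d

def pvP (s : List Char) : Prop :=
  ∃ k : Nat, 1 ≤ k ∧ k < s.length ∧ s = s.drop k ++ s.take k

lemma pvQ_to_pvP (s : List Char) (h : pvQ s) : pvP s := by
  obtain ⟨d, hd1, hd2, hdvd, hper⟩ := h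
  have hn : 0 < s.length := by omega
  refine ⟨d, hd1, by omega, ?_⟩
  rw [pvRot_iff s d (by omega) hn]
  intro j hj
  have hmlt : (j + d) % s.length < s.length := Nat.mod_lt _ hn
  rw [hper j hj, hper _ hmlt, Nat.mod_mod_of_dvd _ hdvd, Nat.add_mod_right]

def pvG (s : List Char) (z : Int) : Char := s.getD ((z % (s.length : Int)).toNat) 'a'

lemma pvG_iter (s : List Char) (p : Nat) (hstep : ∀ z, pvG s (z + p) = pvG s z) :
    ∀ (t : ℤ) (z : Int), pvG s (z + t * p) = pvG s z := by
  have hsub : ∀ w, pvG s (w - p) = pvG s w := by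
    intro w
    have h2 := hstep (w - p)
    rw [sub_add_cancel] at h2
    exact h2.symm
  intro t
  induction t using Int.induction_on with
  | zero => simp
  | succ i ih =>
    intro z
    have he : z + ((i : ℤ) + 1) * p = (z + i * p) + p := by ring
    rw [he, hstep, ih]
  | pred i ih =>
    intro z
    have he : z + (-(i : ℤ) - 1) * p = (z + (-(i : ℤ)) * p) - p := by ring
    rw [he, hsub, ih]

lemma pvG_nat (s : List Char) (j : Nat) (hj : j < s.length) :
    pvG s (j : Int) = s.getD j 'a' := by
  unfold pvG
  rw [Int.emod_eq_of_lt (by omega) (by exact_mod_cast hj)]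
  simp

lemma pvP_to_pvQ (s : List Char) (h : pvP s) : pvQ s := by
  obtain ⟨k, hk1, hk2, hrot⟩ := h
  have hn : 0 < s.length := by omega
  have H := (pvRot_iff s k (by omega) hn).mp hrot
  have hGk : ∀ z, pvG s (z + k) = pvG s z := by
    intro z
    have hnz : (s.length : Int) ≠ 0 := by exact_mod_cast hn.ne'
    have hj0 : 0 ≤ z % (s.length : Int) := Int.emod_nonneg z hnz
    have hjlt : z % (s.length : Int) < (s.length : Int) := Int.emod_lt_of_pos z (by exact_mod_cast hn)
    set j := (z % (s.length : Int)).toNat with hjdef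
    have hjn : j < s.length := by omega
    have hz : z % (s.length : Int) = (j : Int) := by omega
    have e1 : (z + (k : Int)) % (s.length : Int) = (((j + k) % s.length : Nat) : Int) := by
      conv_lhs => rw [Int.add_emod, hz, Int.add_emod_emod]
      push_cast
      rfl
    unfold pvG
    rw [e1]
    simp only [Int.toNat_natCast]
    rw [← hjdef]
    exact (H j hjn).symm
  have hGn : ∀ z, pvG s (z + (s.length : Int)) = pvG s z := by
    intro z
    unfold pvG
    rw [Int.add_emod_right]
  set g := Nat.gcd k s.length with hgdef
  have hgpos : 1 ≤ g := Nat.gcd_pos_of_pos_left _ (by omega)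
  have hgd : g ∣ s.length := Nat.gcd_dvd_right _ _
  have hgk : g ≤ k := Nat.le_of_dvd (by omega) (Nat.gcd_dvd_left _ _)
  have h2g : 2 * g ≤ s.length := by
    obtain ⟨m, hm⟩ := hgd
    have hm2 : 2 ≤ m := by
      rcases m with _ | _ | m
      · omega
      · omega
      · omega
    calc 2 * g = g * 2 := by ring
    _ ≤ g * m := Nat.mul_le_mul_left g hm2
    _ = s.length := hm.symm
  have hab := Nat.gcd_eq_gcd_ab k s.length
  have hGg : ∀ z, pvG s (z + (g : Int)) = pvG s z := by
    intro z
    have e : z + (g : Int) =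
        (z + Nat.gcdA k s.length * (k : Int)) + Nat.gcdB k s.length * (s.length : Int) := by
      rw [show ((g : Nat) : Int) = (k : Int) * Nat.gcdA k s.length + (s.length : Int) * Nat.gcdB k s.length from hab]
      ring
    rw [e, pvG_iter s s.length hGn, pvG_iter s k hGk]
  refine ⟨g, hgpos, h2g, hgd, ?_⟩
  intro j hj
  have eN : j % g + j / g * g = j := Nat.mod_add_div' j g
  have e2 : (j : Int) = ((j % g : Nat) : Int) + ((j / g : Nat) : Int) * (g : Int) := by
    exact_mod_cast eN.symm
  have hjg : j % g < s.length := by omega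
  rw [← pvG_nat s j hj, ← pvG_nat s (j % g) hjg, e2, pvG_iter s g hGg]

lemma pvSlice_eq (s : List Char) (hn : 0 < s.length) :
    PySem.List.slice (s ++ s) (some 1) (some (-1)) = ((s ++ s).drop 1).take (2 * s.length - 2) := by
  simp [PySem.List.slice]
  rw [min_eq_left (by omega), List.drop_one]
  congr 1
  omega

lemma pvAnyA_iff (s : List Char) :
    ((PySem.List.pyRange 1 (PySem.Int.truncdiv (PySem.Chars.len s) 2 + 1) 1).any
      (fun i => pvChunksMatch s i (PySem.Chars.len s)) = true) ↔ pvQ s := by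
  have hlen : PySem.Chars.len s = (s.length : Int) := by simp
  have htd : PySem.Int.truncdiv (s.length : Int) 2 = ((s.length / 2 : Nat) : Int) := by
    simp [PySem.Int.truncdiv]
  rw [List.any_eq_true]
  constructor
  · rintro ⟨i, hi, hpred⟩
    rw [hlen, htd, PySem.List.mem_pyRange_one] at hi
    obtain ⟨h1, h2⟩ := hi
    set d := i.toNat with hd
    have hid : i = (d : Int) := by omega
    have hd1 : 1 ≤ d := by omega
    have h2d : 2 * d ≤ s.length := by
      have : d ≤ s.length / 2 := by omega
      omega
    rw [hid, hlen] at hpred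
    have := (pvChunksMatch_iff s d hd1).mp hpred
    have := (pvChunkAll_iff s d hd1 h2d).mp this
    exact ⟨d, hd1, h2d, this.1, this.2⟩
  · rintro ⟨d, hd1, h2d, hdvd, hper⟩
    refine ⟨(d : Int), ?_, ?_⟩
    · rw [hlen, htd, PySem.List.mem_pyRange_one]
      have : d ≤ s.length / 2 := by omega
      omega
    · rw [hlen]
      exact (pvChunksMatch_iff s d hd1).mpr ((pvChunkAll_iff s d hd1 h2d).mpr ⟨hdvd, hper⟩)

lemma pvIsIn_iff (s : List Char) (hn : 0 < s.length) :
    PySem.Chars.isIn s (PySem.List.slice (s ++ s) (some 1) (some (-1))) = true ↔ pvP s := by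
  rw [pvSlice_eq s hn, ← PySem.Chars.exists_prefix_drop_iff_isIn]
  have hrotk : ∀ k : Nat, 1 ≤ k → k ≤ s.length →
      ((s ++ s).drop k).take s.length = s.drop k ++ s.take k := by
    intro k hk1 hk2
    rw [List.drop_append_of_le_length hk2, List.take_append,
        List.take_of_length_le (by simp), List.length_drop,
        show s.length - (s.length - k) = k from by omega]
  constructor
  · rintro ⟨j, hpre⟩
    have hdj : (((s ++ s).drop 1).take (2 * s.length - 2)).drop j
        = ((s ++ s).drop (1 + j)).take (2 * s.length - 2 - j) := by
      rw [List.drop_take, List.drop_drop]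
    rw [hdj] at hpre
    have hlenle := hpre.length_le
    simp at hlenle
    have hjb : j ≤ s.length - 2 := by omega
    have hk1 : 1 ≤ 1 + j := by omega
    have hk2 : 1 + j ≤ s.length := by omega
    have heq : s = (((s ++ s).drop (1 + j)).take (2 * s.length - 2 - j)).take s.length := by
      rw [List.prefix_iff_eq_take] at hpre
      exact hpre
    rw [List.take_take, min_eq_left (by omega)] at heq
    rw [hrotk (1 + j) hk1 hk2] at heq
    exact ⟨1 + j, hk1, by omega, heq⟩
  · rintro ⟨k, hk1, hk2, hrot⟩
    refine ⟨k - 1, ?_⟩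
    have hdj : (((s ++ s).drop 1).take (2 * s.length - 2)).drop (k - 1)
        = ((s ++ s).drop k).take (2 * s.length - 1 - k) := by
      rw [List.drop_take, List.drop_drop, show 1 + (k - 1) = k from by omega,
          show 2 * s.length - 2 - (k - 1) = 2 * s.length - 1 - k from by omega]
    rw [hdj]
    have heq : s = ((s ++ s).drop k).take s.length := by
      rw [hrotk k hk1 (by omega)]
      exact hrot
    rw [show ((s ++ s).drop k).take s.length
        = (((s ++ s).drop k).take (2 * s.length - 1 - k)).take s.length by
      rw [List.take_take, min_eq_left (by omega)]] at heq
    nth_rewrite 1 [heq]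
    exact List.take_prefix _ _

lemma pvToChars_ne_nil (n : Int) : PySem.Int.toChars n ≠ [] := by
  unfold PySem.Int.toChars
  split <;> simp [← List.length_pos_iff, Nat.length_toDigits_pos]

-- ===== VERDICT (by name: the statement is the Claim_ definition above) =====
theorem find_part_2_matches_spec : Claim_equal_find_part_2_matches := by
  intro input _
  unfold Spec_find_part_2_matches find_part_2_matches find_part_2_matches_alt
  have hne := pvToChars_ne_nil input
  set s := PySem.Int.toChars input with hs
  have hn : 0 < s.length := List.length_pos_iff.mpr hne
  rw [pvScan_eq]
  by_cases h : pvQ s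
  · rw [if_pos (pvAnyA_iff s |>.mpr h), if_pos ((pvIsIn_iff s hn).mpr (pvQ_to_pvP s h))]
  · rw [if_neg, if_neg]
    · simp only [pvIsIn_iff s hn]; exact fun hp => h (pvP_to_pvQ s hp)
    · simp only [pvAnyA_iff s]; exact h
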